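-- pv_equiv track=rewrite | github.com/981377660LMT/algorithm-study | 15_双指针/经典题/Window Queries 👻-多少个长为k的窗口包含query.py | solve
-- ===== SOURCE A (Python) =====
-- from collections import defaultdict
--
-- def solve(nums, queries, k):
--     def getWays(query: int) -> int:
--         """求有多少个长为k的窗口包含query"""
--         res = 0
--         preRight = -1
--         for index in indexMap[query]:
--             # 窗口左边界的范围在left到right之间取
--             left = max(index - k + 1, preRight + 1)
--             right = min(index, n - k)
--             res += right - left + 1
--             preRight = right
--         return res
--
--     n = len(nums)
--     indexMap = defaultdict(list)
--     for i, num in enumerate(nums):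
--         indexMap[num].append(i)
--
--     return list(map(getWays, queries))
-- ===== SOURCE B (Python) =====
-- def solve(nums, queries, k):
--     # Complement counting: windows containing q = total windows - windows in the
--     # gaps between consecutive occurrences of q; computed once per distinct query.
--     n = len(nums)
--     pos = {}
--     for i, num in enumerate(nums):
--         pos.setdefault(num, []).append(i)
--
--     def ways(q):
--         if q not in pos:
--             return 0
--         avoid = 0
--         prev = -1
--         for i in pos[q]:
--             gap = i - prev - 1
--             if gap >= k:
--                 avoid += gap - k + 1
--             prev = i
--         gap = n - prev - 1
--         if gap >= k:
--             avoid += gap - k + 1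
--         return (n - k + 1) - avoid
--
--     memo = {}
--     out = []
--     for q in queries:
--         if q not in memo:
--             memo[q] = ways(q)
--         out.append(memo[q])
--     return out
-- ===== Notes on version B (the rewrite author's own statement) =====
-- stated objective: faster
-- what changed: B counts windows by complement (total windows minus windows fitting in the gaps between consecutive occurrences) and memoizes the per-value count, so each distinct occurrence list is scanned once; A rescans the occurrence list of every query.
import Mathlib
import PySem

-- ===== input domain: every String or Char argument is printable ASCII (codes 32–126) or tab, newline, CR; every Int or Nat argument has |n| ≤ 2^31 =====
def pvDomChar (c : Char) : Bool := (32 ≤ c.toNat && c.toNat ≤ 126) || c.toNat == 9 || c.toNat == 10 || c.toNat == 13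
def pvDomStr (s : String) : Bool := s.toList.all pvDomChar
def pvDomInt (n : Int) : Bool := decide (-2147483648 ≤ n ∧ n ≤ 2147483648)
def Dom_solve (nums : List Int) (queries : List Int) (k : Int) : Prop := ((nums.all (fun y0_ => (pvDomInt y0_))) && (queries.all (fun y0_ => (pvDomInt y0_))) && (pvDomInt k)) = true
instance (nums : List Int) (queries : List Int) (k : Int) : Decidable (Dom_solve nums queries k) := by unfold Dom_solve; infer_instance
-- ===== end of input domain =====

-- B differs from A: it counts the k-windows containing a value by complement over the
-- gaps between consecutive occurrences, computed once per distinct query (memoized),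
-- instead of A's per-query union of clipped per-occurrence intervals.

-- ===== PORT A =====
-- A-side helper: the body of getWays' loop (state = (res, preRight))
def pvAstep (n k : Int) (st : Int × Int) (index : Int) : Int × Int :=
  let left := max (index - k + 1) (st.2 + 1)
  let right := min index (n - k)
  (st.1 + (right - left + 1), right)

-- A-side helper: the inner function getWays
def pvGetWays (indexMap : PySem.Dict Int (List Int)) (n k : Int) (query : Int) : Int :=
  ((indexMap.getD query []).foldl (pvAstep n k) (0, -1)).1

def solve (nums : List Int) (queries : List Int) (k : Int) : List Int :=
  let n : Int := nums.length
  -- for i, num in enumerate(nums): indexMap[num].append(i)   (defaultdict(list))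
  let indexMap : PySem.Dict Int (List Int) :=
    (PySem.List.enumerate nums 0).foldl
      (fun d p => d.modify p.2 [] (fun l => l ++ [p.1])) PySem.Dict.empty
  queries.map (pvGetWays indexMap n k)

-- ===== PORT B =====
-- B-side helper: the body of the gap-scan loop in ways (state = (avoid, prev))
def pvBstep (k : Int) (st : Int × Int) (i : Int) : Int × Int :=
  let gap := i - st.2 - 1
  (st.1 + (if gap ≥ k then gap - k + 1 else 0), i)

-- B-side helper: ways(q) — complement count over the gaps between occurrences
def pvWays (pos : PySem.Dict Int (List Int)) (n k : Int) (q : Int) : Int :=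
  if pos.contains q then
    let s := (pos.getD q []).foldl (pvBstep k) (0, -1)
    let gap := n - s.2 - 1
    let avoid := s.1 + (if gap ≥ k then gap - k + 1 else 0)
    (n - k + 1) - avoid
  else 0

def solve_alt (nums : List Int) (queries : List Int) (k : Int) : List Int :=
  let n : Int := nums.length
  -- pos.setdefault(num, []).append(i) : append i to pos[num], defaulting to []
  let pos : PySem.Dict Int (List Int) :=
    (PySem.List.enumerate nums 0).foldl
      (fun d p => d.modify p.2 [] (fun l => l ++ [p.1])) PySem.Dict.empty
  -- memoized mapping over the queries
  ((queries.foldl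
      (fun (st : PySem.Dict Int Int × List Int) q =>
        let memo := if st.1.contains q then st.1 else st.1.insert q (pvWays pos n k q)
        (memo, st.2 ++ [memo.getD q 0]))
      (PySem.Dict.empty, []))).2

-- ===== PRECONDITION & SPEC =====
def Spec_solve (nums : List Int) (queries : List Int) (k : Int) (out : List Int) : Prop := out = solve_alt nums queries k
instance (nums : List Int) (queries : List Int) (k : Int) (out : List Int) : Decidable (Spec_solve nums queries k out) := by unfold Spec_solve; infer_instance

-- ===== CLAIM (what is proved, stated in full; the proofs are below) =====
def Claim_equal_solve : Prop := ∀ (nums : List Int) (queries : List Int) (k : Int), Dom_solve nums queries k → Spec_solve nums queries k (solve nums queries k)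

-- ===== LEMMAS AND PROOFS =====

-- "accumulated value" and "preRight" of A's state as a function of B's prev pointer
def pvVOf (n k p : Int) : Int := if p = -1 then 0 else min p (n - k) + 1
def pvROf (n k p : Int) : Int := if p = -1 then -1 else min p (n - k)

theorem pvFoldB_snd (k : Int) (l : List Int) : ∀ (a p : Int),
    (l.foldl (pvBstep k) (a, p)).2 = l.getLastD p := by
  induction l with
  | nil => intro a p; rfl
  | cons i t ih =>
    intro a p
    rw [List.foldl_cons, List.getLastD_cons]
    exact ih _ i

-- the loop correspondence: A's accumulated result tracks B's (avoid, prev) state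
theorem pvMain (n k : Int) (l : List Int) : ∀ (p res avoid : Int),
    -1 ≤ p → List.Pairwise (· < ·) (p :: l) → (∀ x ∈ l, x < n) →
    res = pvVOf n k p - avoid →
    (l.foldl (pvAstep n k) (res, pvROf n k p)).1 =
      pvVOf n k ((l.foldl (pvBstep k) (avoid, p)).2) - (l.foldl (pvBstep k) (avoid, p)).1 := by
  induction l with
  | nil =>
    intro p res avoid _ _ _ hres
    simpa [pvVOf] using hres
  | cons i t ih =>
    intro p res avoid hp hpw hlt hres
    rw [List.pairwise_cons] at hpw
    obtain ⟨hfor, hpw'⟩ := hpw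
    have hpi : p < i := hfor i (by simp)
    have hi0 : 0 ≤ i := by omega
    have hine : ¬ i = -1 := by omega
    have hin : i < n := hlt i (by simp)
    have hr : (pvAstep n k (res, pvROf n k p) i).2 = pvROf n k i := by
      simp [pvAstep, pvROf, hine]
    have hnext : (pvAstep n k (res, pvROf n k p) i).1 =
        pvVOf n k i - (pvBstep k (avoid, p) i).1 := by
      unfold pvVOf at hres
      unfold pvAstep pvBstep pvVOf pvROf
      rcases eq_or_ne p (-1) with hp1 | hp1
      · subst hp1
        simp [hine] at hres ⊢
        split_ifs <;> omega
      · simp [hp1, hine] at hres ⊢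
        split_ifs <;> omega
    have hstep := ih i (pvAstep n k (res, pvROf n k p) i).1 (pvBstep k (avoid, p) i).1
      (by omega) hpw' (fun x hx => hlt x (by simp [hx])) hnext
    simp only [List.foldl_cons]
    rw [show pvAstep n k (res, pvROf n k p) i
          = ((pvAstep n k (res, pvROf n k p) i).1, pvROf n k i) from by rw [← hr],
        show pvBstep k (avoid, p) i = ((pvBstep k (avoid, p) i).1, i) from rfl]
    exact hstep

-- the append-to-dict loop, re-keyed through Prod.swap so the grouping lemma applies
theorem pvFoldSwap (l : List (Int × Int)) (d : PySem.Dict Int (List Int)) :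
    l.foldl (fun d p => d.modify p.2 [] (fun l => l ++ [p.1])) d
      = (l.map Prod.swap).foldl (fun d p => d.modify p.1 [] (fun l => l ++ [p.2])) d := by
  induction l generalizing d with
  | nil => rfl
  | cons x t ih => simp [ih]

theorem pvGetD_build (nums : List Int) (q : Int) :
    ((PySem.List.enumerate nums 0).foldl
        (fun d p => d.modify p.2 [] (fun l => l ++ [p.1])) PySem.Dict.empty).getD q []
      = (((PySem.List.enumerate nums 0).map Prod.swap).filter (fun p => p.1 == q)).map (·.2) := by
  rw [pvFoldSwap, PySem.Dict.getD_foldl_modify_append]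
  simp

theorem pvPairwise_build (nums : List Int) (q : Int) :
    List.Pairwise (· < ·)
      ((-1) :: ((((PySem.List.enumerate nums 0).map Prod.swap).filter (fun p => p.1 == q)).map (·.2))) := by
  rw [List.pairwise_cons]
  constructor
  · intro x hx
    simp only [List.mem_map, List.mem_filter, List.mem_map] at hx
    obtain ⟨p, ⟨⟨p', hp', hswap⟩, _⟩, hx⟩ := hx
    rw [PySem.List.mem_enumerate_iff] at hp'
    obtain ⟨j, hj, rfl⟩ := hp'
    subst hswap; subst hx; simp; omega
  · have h1 : ((PySem.List.enumerate nums 0).map Prod.swap).Pairwise (fun a b => a.2 < b.2) := by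
      rw [List.pairwise_map]
      exact PySem.List.pairwise_lt_enumerate nums 0
    have h2 := h1.filter (fun p => p.1 == q)
    rw [List.pairwise_map]
    exact h2

theorem pvLt_build (nums : List Int) (q : Int) : ∀ x ∈
    ((((PySem.List.enumerate nums 0).map Prod.swap).filter (fun p => p.1 == q)).map (·.2)),
    x < (nums.length : Int) := by
  intro x hx
  simp only [List.mem_map, List.mem_filter] at hx
  obtain ⟨p, ⟨⟨p', hp', hswap⟩, _⟩, hx⟩ := hx
  rw [PySem.List.mem_enumerate_iff] at hp'
  obtain ⟨j, hj, rfl⟩ := hp'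
  subst hswap; subst hx; simp; omega

theorem pvContains_build (nums : List Int) (q : Int) :
    ((PySem.List.enumerate nums 0).foldl
        (fun d p => d.modify p.2 [] (fun l => l ++ [p.1])) PySem.Dict.empty).contains q
      = true → q ∈ nums := by
  intro hc
  rw [PySem.Dict.contains_iff_mem_keys] at hc
  rw [PySem.Dict.keys_foldl_modify_key (key := Prod.snd)] at hc
  simp only [PySem.Dict.keys_empty, PySem.Set.update_nil_left, PySem.List.map_snd_enumerate] at hc
  rwa [PySem.Set.mem_ofList] at hc

theorem pvNe_nil_build (nums : List Int) (q : Int) (hq : q ∈ nums) :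
    ((((PySem.List.enumerate nums 0).map Prod.swap).filter (fun p => p.1 == q)).map (·.2)) ≠ [] := by
  rw [List.mem_iff_getElem] at hq
  obtain ⟨j, hj, hje⟩ := hq
  apply List.ne_nil_of_mem (a := (j : Int))
  simp only [List.mem_map, List.mem_filter]
  refine ⟨(q, (j : Int)), ⟨⟨((j : Int), q), ?_, rfl⟩, by simp⟩, rfl⟩
  rw [PySem.List.mem_enumerate_iff]
  exact ⟨j, hj, by simp [hje]⟩

-- pointwise: A's getWays equals B's ways, given the shape facts about the occurrence list
theorem pvPoint (D : PySem.Dict Int (List Int)) (n k q : Int) (L : List Int)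
    (hL : D.getD q [] = L)
    (hpw : List.Pairwise (· < ·) ((-1) :: L))
    (hlt : ∀ x ∈ L, x < n)
    (hne : D.contains q = true → L ≠ []) :
    pvGetWays D n k q = pvWays D n k q := by
  unfold pvGetWays pvWays
  rw [hL]
  by_cases hc : D.contains q = true
  · rw [if_pos hc]
    have hne' := hne hc
    have hmain := pvMain n k L (-1) 0 0 (by norm_num) hpw hlt (by simp [pvVOf])
    have hr0 : pvROf n k (-1) = -1 := by simp [pvROf]
    rw [hr0] at hmain
    have hsnd := pvFoldB_snd k L 0 (-1)
    have hlast : L.getLastD (-1) ∈ L := by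
      cases L with
      | nil => exact absurd rfl hne'
      | cons a t =>
        rw [List.getLastD_cons]
        exact List.getLastD_mem_cons
    have hlb : (0 : Int) ≤ L.getLastD (-1) := by
      rw [List.pairwise_cons] at hpw
      have := hpw.1 _ hlast
      omega
    have hub : L.getLastD (-1) < n := hlt _ hlast
    simp only []
    rw [hmain, hsnd]
    simp only [pvVOf]
    rw [if_neg (show ¬ L.getLastD (-1) = -1 by omega)]
    split_ifs <;> omega
  · rw [if_neg hc]
    have hc' : D.contains q = false := by
      cases h : D.contains q
      · rfl
      · exact absurd h hc
    have hnil : L = [] := by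
      rw [← hL]
      exact PySem.Dict.getD_of_not_contains D [] hc'
    subst hnil
    rfl

-- the memoized mapping loop produces the plain map of the ways function
theorem pvMemo (w : Int → Int) (qs : List Int) : ∀ (m : PySem.Dict Int Int) (acc : List Int),
    (∀ x v, m.get? x = some v → v = w x) →
    (qs.foldl
        (fun (st : PySem.Dict Int Int × List Int) q =>
          let memo := if st.1.contains q then st.1 else st.1.insert q (w q)
          (memo, st.2 ++ [memo.getD q 0]))
        (m, acc)).2 = acc ++ qs.map w := by
  induction qs with
  | nil => intro m acc _; simp
  | cons q t ih =>
    intro m acc hinv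
    simp only [List.foldl_cons]
    by_cases hc : m.contains q = true
    · have hsome : (m.get? q).isSome := by
        cases h : m.get? q
        · rw [PySem.Dict.get?_eq_none_iff_contains] at h
          rw [h] at hc; exact absurd hc (by simp)
        · simp
      obtain ⟨v, hv⟩ := Option.isSome_iff_exists.mp hsome
      have hval : m.getD q 0 = w q := by
        rw [PySem.Dict.getD_eq_get?_getD, hv]
        simpa using hinv q v hv
      simp only [hc, if_true]
      rw [ih m (acc ++ [m.getD q 0]) hinv, hval]
      simp
    · have hc' : (if m.contains q = true then m else m.insert q (w q)) = m.insert q (w q) := by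
        simp [hc]
      simp only [hc']
      have hval : (m.insert q (w q)).getD q 0 = w q := PySem.Dict.getD_insert_self m q (w q) 0
      have hinv' : ∀ x v, (m.insert q (w q)).get? x = some v → v = w x := by
        intro x v hx
        rw [PySem.Dict.get?_insert] at hx
        split_ifs at hx with hxq
        · subst hxq; injection hx with h; omega
        · exact hinv x v hx
      rw [ih (m.insert q (w q)) (acc ++ [(m.insert q (w q)).getD q 0]) hinv', hval]
      simp

-- ===== VERDICT (by name: the statement is the Claim_ definition above) =====
theorem solve_spec : Claim_equal_solve := by
  intro nums queries k _
  unfold Spec_solve solve solve_alt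
  simp only []
  rw [pvMemo (pvWays ((PySem.List.enumerate nums 0).foldl
        (fun d p => d.modify p.2 [] (fun l => l ++ [p.1])) PySem.Dict.empty) (nums.length : Int) k)
      queries PySem.Dict.empty [] (by intro x v h; rw [PySem.Dict.get?_empty] at h; cases h)]
  simp only [List.nil_append]
  refine List.map_congr_left (fun q _ => ?_)
  exact pvPoint _ (nums.length : Int) k q _ (pvGetD_build nums q) (pvPairwise_build nums q)
    (pvLt_build nums q) (fun hc => pvNe_nil_build nums q (pvContains_build nums q hc))
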